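-- pv_equiv track=rewrite | github.com/MrBrantCode/unitest_baseline | mut_generate/mist_train_cf/cf_32064/solution.py | count_min_cost_paths
-- ===== SOURCE A (Python) =====
-- def count_min_cost_paths(grid):
--     m, n = len(grid), len(grid[0])
--     dp = [[0] * n for _ in range(m)]
--     dp[0][0] = 1
--
--     for i in range(1, m):
--         dp[i][0] = dp[i-1][0] if grid[i][0] == grid[i-1][0] else 0
--
--     for j in range(1, n):
--         dp[0][j] = dp[0][j-1] if grid[0][j] == grid[0][j-1] else 0
--
--     for i in range(1, m):
--         for j in range(1, n):
--             if grid[i][j] == grid[i-1][j]: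
--                 dp[i][j] += dp[i-1][j]
--             if grid[i][j] == grid[i][j-1]:
--                 dp[i][j] += dp[i][j-1]
--
--     return dp[m-1][n-1]
-- ===== SOURCE B (Python) =====
-- def count_min_cost_paths(grid):
--     m, n = len(grid), len(grid[0])
--     memo = {}
--     stack = [(m - 1, n - 1, False)]
--     push = stack.append
--     while stack:
--         i, j, expanded = stack.pop()
--         k = i * n + j
--         if k in memo:
--             continue
--         if k == 0:
--             memo[0] = 1
--             continue
--         row = grid[i]
--         v = row[j]
--         if expanded:
--             total = 0
--             if i and v == grid[i - 1][j]:
--                 total += memo[k - n]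
--             if j and v == row[j - 1]:
--                 total += memo[k - 1]
--             memo[k] = total
--         else:
--             push((i, j, True))
--             if i and v == grid[i - 1][j]:
--                 push((i - 1, j, False))
--             if j and v == row[j - 1]:
--                 push((i, j - 1, False))
--     return memo[m * n - 1]
-- ===== Notes on version B (the rewrite author's own statement) =====
-- stated objective: alternative
-- what changed: Replaces A's bottom-up three-loop m-by-n dp table with a top-down memoized search: an explicit stack of frames and a dict cache compute only the subproblems the target cell actually depends on, instead of filling the whole table.
import Mathlib
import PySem

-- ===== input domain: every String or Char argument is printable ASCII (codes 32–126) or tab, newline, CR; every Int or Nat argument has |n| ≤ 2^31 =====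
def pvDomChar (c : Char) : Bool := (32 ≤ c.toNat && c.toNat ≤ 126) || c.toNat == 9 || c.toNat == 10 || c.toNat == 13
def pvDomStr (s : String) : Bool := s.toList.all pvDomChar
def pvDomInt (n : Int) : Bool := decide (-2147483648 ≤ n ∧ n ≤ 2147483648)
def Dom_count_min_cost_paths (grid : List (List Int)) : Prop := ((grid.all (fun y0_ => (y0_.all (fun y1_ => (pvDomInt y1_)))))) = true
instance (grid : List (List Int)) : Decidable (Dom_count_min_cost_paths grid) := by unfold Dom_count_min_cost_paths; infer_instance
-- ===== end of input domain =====

-- B replaces A's bottom-up three-loop dp table with a top-down memoized search (explicit stack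
-- of frames plus a dict cache keyed by the int i*n+j), computing only the subproblems the
-- target cell depends on (objective: alternative).

-- ===== PORT A =====
-- grid[i][j] read; within Pre_ every access is in range, so the default is never returned
def pvG (grid : List (List Int)) (i j : Nat) : Int := (grid.getD i []).getD j 0
-- dp[i][j] write on the 2-D table (reads reuse pvG)
def pvSet2 (dp : List (List Int)) (i j : Nat) (v : Int) : List (List Int) :=
  dp.set i ((dp.getD i []).set j v)

def count_min_cost_paths (grid : List (List Int)) : Int :=
  let m := grid.length
  let n := (grid.getD 0 []).length
  let dp := List.replicate m (List.replicate n (0 : Int))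
  let dp := pvSet2 dp 0 0 1
  let dp := (List.range' 1 (m - 1)).foldl (fun dp i =>
    pvSet2 dp i 0 (if pvG grid i 0 = pvG grid (i-1) 0 then pvG dp (i-1) 0 else 0)) dp
  let dp := (List.range' 1 (n - 1)).foldl (fun dp j =>
    pvSet2 dp 0 j (if pvG grid 0 j = pvG grid 0 (j-1) then pvG dp 0 (j-1) else 0)) dp
  let dp := (List.range' 1 (m - 1)).foldl (fun dp i =>
    (List.range' 1 (n - 1)).foldl (fun dp j =>
      let dp := if pvG grid i j = pvG grid (i-1) j
        then pvSet2 dp i j (pvG dp i j + pvG dp (i-1) j) else dp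
      if pvG grid i j = pvG grid i (j-1)
        then pvSet2 dp i j (pvG dp i j + pvG dp i (j-1)) else dp) dp) dp
  pvG dp (m - 1) (n - 1)

-- ===== PORT B =====
-- the while loop of Source B: stack frames (i, j, expanded), memo dict keyed by the int i*n+j.
-- The fuel argument only makes the loop total in Lean (the Python loop always terminates);
-- the proofs show the initial fuel 3^(m+n) is never exhausted under Pre_.
def pvLoop (grid : List (List Int)) (n : Nat) :
    Nat → List (Nat × Nat × Bool) → PySem.Dict Int Int → PySem.Dict Int Int
  | 0, _, memo => memo
  | _+1, [], memo => memo
  | fuel+1, (i, j, expanded) :: rest, memo =>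
    if memo.contains ((i * n + j : Nat) : Int) then pvLoop grid n fuel rest memo
    else if i * n + j = 0 then pvLoop grid n fuel rest (memo.insert 0 1)
    else if expanded then
      pvLoop grid n fuel rest (memo.insert ((i * n + j : Nat) : Int)
        ((if 0 < i ∧ pvG grid i j = pvG grid (i-1) j
            then memo.getD ((i * n + j - n : Nat) : Int) 0 else 0)
         + (if 0 < j ∧ pvG grid i j = pvG grid i (j-1)
            then memo.getD ((i * n + j - 1 : Nat) : Int) 0 else 0)))
    else
      pvLoop grid n fuel
        ((if 0 < j ∧ pvG grid i j = pvG grid i (j-1)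
            then [((i, j-1, false) : Nat × Nat × Bool)] else []) ++
         (if 0 < i ∧ pvG grid i j = pvG grid (i-1) j
            then [((i-1, j, false) : Nat × Nat × Bool)] else []) ++
         ((i, j, true) :: rest)) memo

def count_min_cost_paths_alt (grid : List (List Int)) : Int :=
  let m := grid.length
  let n := (grid.getD 0 []).length
  let memo := pvLoop grid n (3 ^ (m + n)) [(m - 1, n - 1, false)] PySem.Dict.empty
  memo.getD ((m * n - 1 : Nat) : Int) 0

-- ===== PRECONDITION & SPEC =====
-- Pre_ excludes exactly the inputs where Python A raises IndexError: the empty grid,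
-- an empty first row, and grids where some row is shorter than the first row.
def Pre_count_min_cost_paths (grid : List (List Int)) : Prop :=
  grid ≠ [] ∧ (grid.getD 0 []) ≠ [] ∧ ∀ row ∈ grid, (grid.getD 0 []).length ≤ row.length
instance (grid : List (List Int)) : Decidable (Pre_count_min_cost_paths grid) := by
  unfold Pre_count_min_cost_paths; infer_instance

def pvWitness_count_min_cost_paths : List (List Int) := [[1, 1], [1, 2]]

def Spec_count_min_cost_paths (grid : List (List Int)) (out : Int) : Prop := out = count_min_cost_paths_alt grid
instance (grid : List (List Int)) (out : Int) : Decidable (Spec_count_min_cost_paths grid out) := by unfold Spec_count_min_cost_paths; infer_instance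

-- ===== CLAIM (what is proved, stated in full; the proofs are below) =====
def Claim_equal_count_min_cost_paths : Prop := ∀ (grid : List (List Int)), Dom_count_min_cost_paths grid → Pre_count_min_cost_paths grid → Spec_count_min_cost_paths grid (count_min_cost_paths grid)

-- ===== LEMMAS AND PROOFS =====

-- number of monochromatic-step paths from (0,0) to (i,j): the common spec of both ports
def pvD (grid : List (List Int)) : Nat → Nat → Int
  | 0, 0 => 1
  | i+1, 0 => if pvG grid (i+1) 0 = pvG grid i 0 then pvD grid i 0 else 0
  | 0, j+1 => if pvG grid 0 (j+1) = pvG grid 0 j then pvD grid 0 j else 0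
  | i+1, j+1 =>
      (if pvG grid (i+1) (j+1) = pvG grid i (j+1) then pvD grid i (j+1) else 0)
    + (if pvG grid (i+1) (j+1) = pvG grid (i+1) j then pvD grid (i+1) j else 0)
  termination_by i j => (i, j)

lemma pvRange'_concat (s n : Nat) : List.range' s (n+1) = List.range' s n ++ [s+n] := by
  simpa using List.range'_concat (s := s) (n := n) (step := 1)

-- ===== A side =====

def pvShape (dp : List (List Int)) (m n : Nat) : Prop :=
  dp.length = m ∧ ∀ i, i < m → (dp.getD i []).length = n

def pvEqAt (dp : List (List Int)) (m n : Nat) (f : Nat → Nat → Int) : Prop :=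
  ∀ i j, i < m → j < n → pvG dp i j = f i j

lemma pvShape_set2 (dp : List (List Int)) (m n i j : Nat) (v : Int)
    (h : pvShape dp m n) : pvShape (pvSet2 dp i j v) m n := by
  obtain ⟨h1, h2⟩ := h
  refine ⟨by simp [pvSet2, h1], ?_⟩
  intro i' hi'
  by_cases hii : i = i'
  · subst hii
    have hlt : i < dp.length := by omega
    simp [pvSet2, List.getD_eq_getElem?_getD, List.getElem?_set_self hlt]
    exact h2 i hi'
  · simp only [pvSet2, List.getD_eq_getElem?_getD, List.getElem?_set_ne hii]
    simpa [List.getD_eq_getElem?_getD] using h2 i' hi'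

lemma pvG_set2_self (dp : List (List Int)) (i j : Nat) (v : Int)
    (h1 : i < dp.length) (h2 : j < (dp.getD i []).length) :
    pvG (pvSet2 dp i j v) i j = v := by
  unfold pvG pvSet2
  simp only [List.getD_eq_getElem?_getD] at h2 ⊢
  rw [List.getElem?_set_self h1, Option.getD_some,
    List.getElem?_set_self (by simpa using h2), Option.getD_some]

lemma pvG_set2_ne (dp : List (List Int)) (i j : Nat) (v : Int) (i' j' : Nat)
    (h : i ≠ i' ∨ j ≠ j') :
    pvG (pvSet2 dp i j v) i' j' = pvG dp i' j' := by
  by_cases hii : i = i'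
  · subst hii
    have hjj : j ≠ j' := h.resolve_left (by simp)
    by_cases hlt : i < dp.length
    · simp [pvG, pvSet2, List.getD_eq_getElem?_getD, List.getElem?_set_self hlt,
        List.getElem?_set_ne hjj]
    · unfold pvSet2
      rw [List.set_eq_of_length_le (by omega)]
  · simp [pvG, pvSet2, List.getD_eq_getElem?_getD, List.getElem?_set_ne hii]

lemma pvEqAt_mono {dp : List (List Int)} {m n : Nat} {f g : Nat → Nat → Int}
    (h : ∀ i j, i < m → j < n → f i j = g i j) (he : pvEqAt dp m n f) : pvEqAt dp m n g := by
  intro i j hi hj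
  rw [he i j hi hj, h i j hi hj]

-- expected table contents after phase-1 prefix t, phase-2 prefix t, and phase-3 (rows < r done, row r up to column t)
def pvF1 (grid : List (List Int)) (t i j : Nat) : Int :=
  if j = 0 ∧ i ≤ t then pvD grid i j else 0
def pvF2 (grid : List (List Int)) (t i j : Nat) : Int :=
  if j = 0 then pvD grid i j else if i = 0 ∧ j ≤ t then pvD grid i j else 0
def pvF3 (grid : List (List Int)) (r t i j : Nat) : Int :=
  if j = 0 then pvD grid i j else if i = 0 then pvD grid i j
  else if i < r ∨ (i = r ∧ j ≤ t) then pvD grid i j else 0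

lemma a_phase1_step (grid : List (List Int)) (m n t : Nat) (ht : t + 1 ≤ m - 1) (hn1 : 1 ≤ n)
    (dp' : List (List Int)) (sh' : pvShape dp' m n) (eq' : pvEqAt dp' m n (pvF1 grid t)) :
    pvShape (pvSet2 dp' (t+1) 0 (if pvG grid (t+1) 0 = pvG grid t 0 then pvG dp' t 0 else 0)) m n ∧
    pvEqAt (pvSet2 dp' (t+1) 0 (if pvG grid (t+1) 0 = pvG grid t 0 then pvG dp' t 0 else 0)) m n (pvF1 grid (t+1)) := by
  have hm2 : t + 1 < m := by omega
  have hval : pvG dp' t 0 = pvD grid t 0 := by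
    rw [eq' t 0 (by omega) (by omega)]
    simp [pvF1]
  rw [hval, show (if pvG grid (t+1) 0 = pvG grid t 0 then pvD grid t 0 else 0) = pvD grid (t+1) 0
    from by simp [pvD]]
  refine ⟨pvShape_set2 _ _ _ _ _ _ sh', ?_⟩
  intro i j hi hj
  by_cases hij : i = t + 1 ∧ j = 0
  · obtain ⟨rfl, rfl⟩ := hij
    rw [pvG_set2_self _ _ _ _ (by rw [sh'.1]; omega) (by rw [sh'.2 (t+1) hm2]; omega)]
    simp [pvF1]
  · rw [pvG_set2_ne _ _ _ _ _ _ (by omega), eq' i j hi hj]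
    simp only [pvF1]
    split_ifs <;> first | rfl | omega

lemma a_phase1 (grid : List (List Int)) (m n : Nat) (hn1 : 1 ≤ n)
    (dp0 : List (List Int)) (hsh : pvShape dp0 m n) (heq : pvEqAt dp0 m n (pvF1 grid 0)) :
    ∀ t, t ≤ m - 1 →
      pvShape ((List.range' 1 t).foldl (fun dp i =>
        pvSet2 dp i 0 (if pvG grid i 0 = pvG grid (i-1) 0 then pvG dp (i-1) 0 else 0)) dp0) m n ∧
      pvEqAt ((List.range' 1 t).foldl (fun dp i =>
        pvSet2 dp i 0 (if pvG grid i 0 = pvG grid (i-1) 0 then pvG dp (i-1) 0 else 0)) dp0) m n (pvF1 grid t) := by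
  intro t
  induction t with
  | zero => intro _; exact ⟨hsh, heq⟩
  | succ t ih =>
      intro ht
      obtain ⟨sh', eq'⟩ := ih (by omega)
      rw [pvRange'_concat, List.foldl_append]
      simp only [List.foldl_cons, List.foldl_nil, show 1 + t = t + 1 from by omega,
        Nat.add_sub_cancel]
      exact a_phase1_step grid m n t ht hn1 _ sh' eq'

lemma a_phase2_step (grid : List (List Int)) (m n t : Nat) (ht : t + 1 ≤ n - 1) (hm1 : 1 ≤ m)
    (dp' : List (List Int)) (sh' : pvShape dp' m n) (eq' : pvEqAt dp' m n (pvF2 grid t)) :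
    pvShape (pvSet2 dp' 0 (t+1) (if pvG grid 0 (t+1) = pvG grid 0 t then pvG dp' 0 t else 0)) m n ∧
    pvEqAt (pvSet2 dp' 0 (t+1) (if pvG grid 0 (t+1) = pvG grid 0 t then pvG dp' 0 t else 0)) m n (pvF2 grid (t+1)) := by
  have hn2 : t + 1 < n := by omega
  have hval : pvG dp' 0 t = pvD grid 0 t := by
    rw [eq' 0 t (by omega) (by omega)]
    simp [pvF2]
  rw [hval, show (if pvG grid 0 (t+1) = pvG grid 0 t then pvD grid 0 t else 0) = pvD grid 0 (t+1)
    from by simp [pvD]]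
  refine ⟨pvShape_set2 _ _ _ _ _ _ sh', ?_⟩
  intro i j hi hj
  by_cases hij : i = 0 ∧ j = t + 1
  · obtain ⟨rfl, rfl⟩ := hij
    rw [pvG_set2_self _ _ _ _ (by rw [sh'.1]; omega) (by rw [sh'.2 0 (by omega)]; omega)]
    simp [pvF2]
  · rw [pvG_set2_ne _ _ _ _ _ _ (by omega), eq' i j hi hj]
    simp only [pvF2]
    split_ifs <;> first | rfl | omega

lemma a_phase2 (grid : List (List Int)) (m n : Nat) (hm1 : 1 ≤ m)
    (dp0 : List (List Int)) (hsh : pvShape dp0 m n) (heq : pvEqAt dp0 m n (pvF2 grid 0)) :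
    ∀ t, t ≤ n - 1 →
      pvShape ((List.range' 1 t).foldl (fun dp j =>
        pvSet2 dp 0 j (if pvG grid 0 j = pvG grid 0 (j-1) then pvG dp 0 (j-1) else 0)) dp0) m n ∧
      pvEqAt ((List.range' 1 t).foldl (fun dp j =>
        pvSet2 dp 0 j (if pvG grid 0 j = pvG grid 0 (j-1) then pvG dp 0 (j-1) else 0)) dp0) m n (pvF2 grid t) := by
  intro t
  induction t with
  | zero => intro _; exact ⟨hsh, heq⟩
  | succ t ih =>
      intro ht
      obtain ⟨sh', eq'⟩ := ih (by omega)
      rw [pvRange'_concat, List.foldl_append]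
      simp only [List.foldl_cons, List.foldl_nil, show 1 + t = t + 1 from by omega,
        Nat.add_sub_cancel]
      exact a_phase2_step grid m n t ht hm1 _ sh' eq'

lemma a_inner_step (grid : List (List Int)) (m n r t : Nat) (hr1 : 1 ≤ r) (hrm : r ≤ m - 1)
    (ht : t + 1 ≤ n - 1)
    (dp' : List (List Int)) (sh' : pvShape dp' m n) (eq' : pvEqAt dp' m n (pvF3 grid r t)) :
    pvShape ((fun dp =>
        if pvG grid r (t+1) = pvG grid r t
          then pvSet2 dp r (t+1) (pvG dp r (t+1) + pvG dp r t) else dp)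
      (if pvG grid r (t+1) = pvG grid (r-1) (t+1)
          then pvSet2 dp' r (t+1) (pvG dp' r (t+1) + pvG dp' (r-1) (t+1)) else dp')) m n ∧
    pvEqAt ((fun dp =>
        if pvG grid r (t+1) = pvG grid r t
          then pvSet2 dp r (t+1) (pvG dp r (t+1) + pvG dp r t) else dp)
      (if pvG grid r (t+1) = pvG grid (r-1) (t+1)
          then pvSet2 dp' r (t+1) (pvG dp' r (t+1) + pvG dp' (r-1) (t+1)) else dp')) m n
      (pvF3 grid r (t+1)) := by
  have hrm' : r < m := by omega
  have hcur : pvG dp' r (t+1) = 0 := by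
    rw [eq' r (t+1) hrm' (by omega)]
    unfold pvF3
    rw [if_neg (by omega : ¬ (t + 1 = 0)), if_neg (by omega : ¬ (r = 0)),
      if_neg (by rintro (h | ⟨-, h⟩) <;> omega : ¬ (r < r ∨ (r = r ∧ t + 1 ≤ t)))]
  have hup : pvG dp' (r-1) (t+1) = pvD grid (r-1) (t+1) := by
    rw [eq' (r-1) (t+1) (by omega) (by omega)]
    unfold pvF3
    rw [if_neg (by omega : ¬ (t + 1 = 0))]
    by_cases h0 : r - 1 = 0
    · rw [if_pos h0]
    · rw [if_neg h0, if_pos (Or.inl (by omega))]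
  have hleft : pvG dp' r t = pvD grid r t := by
    rw [eq' r t hrm' (by omega)]
    unfold pvF3
    by_cases h0 : t = 0
    · rw [if_pos h0]
    · rw [if_neg h0, if_neg (by omega : ¬ (r = 0)), if_pos (Or.inr ⟨rfl, Nat.le_refl t⟩)]
  set dpA := (if pvG grid r (t+1) = pvG grid (r-1) (t+1)
      then pvSet2 dp' r (t+1) (pvG dp' r (t+1) + pvG dp' (r-1) (t+1)) else dp') with hdpA
  have shA : pvShape dpA m n := by
    rw [hdpA]; split_ifs
    · exact pvShape_set2 _ _ _ _ _ _ sh'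
    · exact sh'
  have hAself : pvG dpA r (t+1)
      = (if pvG grid r (t+1) = pvG grid (r-1) (t+1) then pvD grid (r-1) (t+1) else 0) := by
    rw [hdpA]; split_ifs with h
    · rw [pvG_set2_self _ _ _ _ (by rw [sh'.1]; omega) (by rw [sh'.2 r hrm']; omega),
        hcur, hup]; ring
    · exact hcur
  have hAne : ∀ i j, ¬ (i = r ∧ j = t+1) → pvG dpA i j = pvG dp' i j := by
    intro i j hij
    rw [hdpA]; split_ifs with h
    · exact pvG_set2_ne _ _ _ _ _ _ (by omega)
    · rfl
  have hAleft : pvG dpA r t = pvD grid r t := by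
    rw [hAne r t (by omega), hleft]
  simp only []
  set dpB := (if pvG grid r (t+1) = pvG grid r t
      then pvSet2 dpA r (t+1) (pvG dpA r (t+1) + pvG dpA r t) else dpA) with hdpB
  have shB : pvShape dpB m n := by
    rw [hdpB]; split_ifs
    · exact pvShape_set2 _ _ _ _ _ _ shA
    · exact shA
  have hBval : pvG dpB r (t+1) = pvD grid r (t+1) := by
    have hBself : pvG dpB r (t+1)
        = pvG dpA r (t+1)
        + (if pvG grid r (t+1) = pvG grid r t then pvD grid r t else 0) := by
      by_cases h2c : pvG grid r (t+1) = pvG grid r t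
      · rw [if_pos h2c, hdpB, if_pos h2c,
          pvG_set2_self _ _ _ _ (by rw [shA.1]; omega) (by rw [shA.2 r hrm']; omega), hAleft]
      · rw [if_neg h2c, add_zero, hdpB, if_neg h2c]
    rw [hBself, hAself]
    obtain ⟨rr, rfl⟩ : ∃ rr, r = rr + 1 := ⟨r - 1, by omega⟩
    simp only [Nat.add_sub_cancel]
    simp [pvD]
  have hBne : ∀ i j, ¬ (i = r ∧ j = t+1) → pvG dpB i j = pvG dp' i j := by
    intro i j hij
    rw [hdpB]; split_ifs with h
    · rw [pvG_set2_ne _ _ _ _ _ _ (by omega)]; exact hAne i j hij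
    · exact hAne i j hij
  refine ⟨shB, ?_⟩
  intro i j hi hj
  by_cases hij : i = r ∧ j = t + 1
  · obtain ⟨hi', rfl⟩ := hij
    rw [hi', hBval]
    unfold pvF3
    rw [if_neg (by omega : ¬ (t + 1 = 0)), if_neg (by omega : ¬ (r = 0)),
      if_pos (Or.inr ⟨rfl, Nat.le_refl (t+1)⟩)]
  · rw [hBne i j hij, eq' i j hi hj]
    simp only [pvF3]
    split_ifs <;> first | rfl | omega

lemma a_inner (grid : List (List Int)) (m n r : Nat) (hr1 : 1 ≤ r) (hrm : r ≤ m - 1)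
    (dp0 : List (List Int)) (hsh : pvShape dp0 m n) (heq : pvEqAt dp0 m n (pvF3 grid r 0)) :
    ∀ t, t ≤ n - 1 →
      pvShape ((List.range' 1 t).foldl (fun dp j =>
        let dp := if pvG grid r j = pvG grid (r-1) j
          then pvSet2 dp r j (pvG dp r j + pvG dp (r-1) j) else dp
        if pvG grid r j = pvG grid r (j-1)
          then pvSet2 dp r j (pvG dp r j + pvG dp r (j-1)) else dp) dp0) m n ∧
      pvEqAt ((List.range' 1 t).foldl (fun dp j =>
        let dp := if pvG grid r j = pvG grid (r-1) j
          then pvSet2 dp r j (pvG dp r j + pvG dp (r-1) j) else dp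
        if pvG grid r j = pvG grid r (j-1)
          then pvSet2 dp r j (pvG dp r j + pvG dp r (j-1)) else dp) dp0) m n (pvF3 grid r t) := by
  intro t
  induction t with
  | zero => intro _; exact ⟨hsh, heq⟩
  | succ t ih =>
      intro ht
      obtain ⟨sh', eq'⟩ := ih (by omega)
      rw [pvRange'_concat, List.foldl_append]
      simp only [List.foldl_cons, List.foldl_nil, show 1 + t = t + 1 from by omega,
        Nat.add_sub_cancel]
      exact a_inner_step grid m n r t hr1 hrm ht _ sh' eq'

lemma pvF3_roll (grid : List (List Int)) (n r : Nat) :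
    ∀ i j, j < n → pvF3 grid r (n-1) i j = pvF3 grid (r+1) 0 i j := by
  intro i j hj
  simp only [pvF3]
  split_ifs <;> first | rfl | omega

lemma a_phase3 (grid : List (List Int)) (m n : Nat) (hn1 : 1 ≤ n)
    (dp0 : List (List Int)) (hsh : pvShape dp0 m n) (heq : pvEqAt dp0 m n (pvF3 grid 0 (n-1))) :
    ∀ k, k ≤ m - 1 →
      pvShape ((List.range' 1 k).foldl (fun dp i =>
        (List.range' 1 (n-1)).foldl (fun dp j =>
          let dp := if pvG grid i j = pvG grid (i-1) j
            then pvSet2 dp i j (pvG dp i j + pvG dp (i-1) j) else dp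
          if pvG grid i j = pvG grid i (j-1)
            then pvSet2 dp i j (pvG dp i j + pvG dp i (j-1)) else dp) dp) dp0) m n ∧
      pvEqAt ((List.range' 1 k).foldl (fun dp i =>
        (List.range' 1 (n-1)).foldl (fun dp j =>
          let dp := if pvG grid i j = pvG grid (i-1) j
            then pvSet2 dp i j (pvG dp i j + pvG dp (i-1) j) else dp
          if pvG grid i j = pvG grid i (j-1)
            then pvSet2 dp i j (pvG dp i j + pvG dp i (j-1)) else dp) dp) dp0) m n (pvF3 grid k (n-1)) := by
  intro k
  induction k with
  | zero => intro _; exact ⟨hsh, heq⟩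
  | succ k ih =>
      intro hk
      obtain ⟨sh', eq'⟩ := ih (by omega)
      rw [pvRange'_concat, List.foldl_append]
      simp only [List.foldl_cons, List.foldl_nil, show 1 + k = k + 1 from by omega]
      have heq2 := pvEqAt_mono (fun i j _ hj => pvF3_roll grid n k i j hj) eq'
      exact a_inner grid m n (k+1) (by omega) (by omega) _ sh' heq2 (n-1) le_rfl

lemma a_eq_pvD (grid : List (List Int)) (h : Pre_count_min_cost_paths grid) :
    count_min_cost_paths grid = pvD grid (grid.length - 1) ((grid.getD 0 []).length - 1) := by
  obtain ⟨hg, hrow0, _⟩ := h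
  have hm1 : 1 ≤ grid.length := List.length_pos_iff.mpr hg
  have hn1 : 1 ≤ (grid.getD 0 []).length := List.length_pos_iff.mpr hrow0
  set m := grid.length with hm
  set n := (grid.getD 0 []).length with hn
  have hsh0 : pvShape (List.replicate m (List.replicate n (0:Int))) m n := by
    refine ⟨by simp, ?_⟩
    intro i hi
    simp [List.getD_eq_getElem?_getD, List.getElem?_replicate, hi]
  have hget0 : ∀ i j, pvG (List.replicate m (List.replicate n (0:Int))) i j = 0 := by
    intro i j
    unfold pvG
    simp only [List.getD_eq_getElem?_getD, List.getElem?_replicate]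
    split_ifs <;> simp
  have hsh1 : pvShape (pvSet2 (List.replicate m (List.replicate n (0:Int))) 0 0 1) m n :=
    pvShape_set2 _ _ _ _ _ _ hsh0
  have heq1 : pvEqAt (pvSet2 (List.replicate m (List.replicate n (0:Int))) 0 0 1) m n (pvF1 grid 0) := by
    intro i j hi hj
    by_cases hij : i = 0 ∧ j = 0
    · obtain ⟨rfl, rfl⟩ := hij
      rw [pvG_set2_self _ _ _ _ (by simpa using hm1)
        (by rw [hsh0.2 0 (by omega)]; omega)]
      simp [pvF1, pvD]
    · rw [pvG_set2_ne _ _ _ _ _ _ (by omega), hget0]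
      simp only [pvF1]
      split_ifs with h1
      · exfalso; omega
      · rfl
  obtain ⟨sh2, eq2⟩ := a_phase1 grid m n hn1 _ hsh1 heq1 (m-1) le_rfl
  have eq2' := pvEqAt_mono (g := pvF2 grid 0) (by
    intro i j hi hj
    simp only [pvF1, pvF2]
    split_ifs <;> first | rfl | omega) eq2
  obtain ⟨sh3, eq3⟩ := a_phase2 grid m n hm1 _ sh2 eq2' (n-1) le_rfl
  have eq3' := pvEqAt_mono (g := pvF3 grid 0 (n-1)) (by
    intro i j hi hj
    simp only [pvF2, pvF3]
    split_ifs <;> first | rfl | omega) eq3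
  obtain ⟨sh4, eq4⟩ := a_phase3 grid m n hn1 _ sh3 eq3' (m-1) le_rfl
  have hfin := eq4 (m-1) (n-1) (by omega) (by omega)
  unfold count_min_cost_paths
  simp only []
  rw [← hm, ← hn, hfin]
  unfold pvF3
  by_cases h1 : n - 1 = 0
  · rw [if_pos h1]
  · rw [if_neg h1]
    by_cases h2 : m - 1 = 0
    · rw [if_pos h2]
    · rw [if_neg h2, if_pos (Or.inr ⟨rfl, Nat.le_refl (n-1)⟩)]

-- ===== B side =====

-- the memo key of cell (i, j)
def pvKeyN (n i j : Nat) : Int := ((i * n + j : Nat) : Int)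

lemma pvKeyN_inj {n a b i j : Nat} (hb : b < n) (hj : j < n)
    (h : pvKeyN n a b = pvKeyN n i j) : a = i ∧ b = j := by
  have hnat : a * n + b = i * n + j := by
    simp only [pvKeyN] at h
    exact_mod_cast h
  have ha : (a * n + b) / n = a := by
    rw [Nat.mul_comm a n, Nat.mul_add_div (by omega), Nat.div_eq_of_lt hb, Nat.add_zero]
  have hi : (i * n + j) / n = i := by
    rw [Nat.mul_comm i n, Nat.mul_add_div (by omega), Nat.div_eq_of_lt hj, Nat.add_zero]
  have hai : a = i := by rw [← ha, ← hi, hnat]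
  subst hai
  exact ⟨rfl, by omega⟩

-- every memo entry holds the path count of its cell
def pvGood (grid : List (List Int)) (n : Nat) (memo : PySem.Dict Int Int) : Prop :=
  ∀ a b : Nat, b < n → ∀ v, memo.get? (pvKeyN n a b) = some v → v = pvD grid a b

-- cell (a, b) is memoized or appears as a frame in fs
def pvCov (n : Nat) (fs : List (Nat × Nat × Bool)) (memo : PySem.Dict Int Int)
    (a b : Nat) : Prop :=
  memo.contains (pvKeyN n a b) = true ∨ ∃ f ∈ fs, f.1 = a ∧ f.2.1 = b

-- the two dependencies of an expanded frame are covered by the frames above it / the memo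
def pvDepsOK (grid : List (List Int)) (n i j : Nat) (ab : List (Nat × Nat × Bool))
    (memo : PySem.Dict Int Int) : Prop :=
  ((0 < i ∧ pvG grid i j = pvG grid (i-1) j) → pvCov n ab memo (i-1) j) ∧
  ((0 < j ∧ pvG grid i j = pvG grid i (j-1)) → pvCov n ab memo i (j-1))

-- well-formed stack: walking from the top, each expanded frame's deps are covered above it
def pvWF (grid : List (List Int)) (n : Nat) :
    List (Nat × Nat × Bool) → List (Nat × Nat × Bool) → PySem.Dict Int Int → Prop
  | [], _, _ => True
  | f :: s, ab, memo =>
      (f.2.2 = true → pvDepsOK grid n f.1 f.2.1 ab memo) ∧ pvWF grid n s (f :: ab) memo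

-- loop measure: expanded frames weigh 1, unexpanded frames 3^(i+j+2)
def pvM (s : List (Nat × Nat × Bool)) : Nat :=
  (s.map (fun f => if f.2.2 then 1 else 3 ^ (f.1 + f.2.1 + 2))).sum

-- covering transfer between stack/memo states
def pvTrans (n : Nat) (ab ab' : List (Nat × Nat × Bool))
    (memo memo' : PySem.Dict Int Int) : Prop :=
  ∀ a b : Nat, pvCov n ab memo a b → pvCov n ab' memo' a b

lemma pvTrans_cons {n ab ab' memo memo'} (f : Nat × Nat × Bool)
    (h : pvTrans n ab ab' memo memo') : pvTrans n (f :: ab) (f :: ab') memo memo' := by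
  intro a b hc
  rcases hc with hm | ⟨g, hg, hk⟩
  · rcases h a b (Or.inl hm) with hm' | ⟨g, hg, hk⟩
    · exact Or.inl hm'
    · exact Or.inr ⟨g, List.mem_cons_of_mem _ hg, hk⟩
  · rcases List.mem_cons.mp hg with rfl | hg'
    · exact Or.inr ⟨g, List.mem_cons_self, hk⟩
    · rcases h a b (Or.inr ⟨g, hg', hk⟩) with hm' | ⟨g', hg'', hk'⟩
      · exact Or.inl hm'
      · exact Or.inr ⟨g', List.mem_cons_of_mem _ hg'', hk'⟩

lemma pvWF_transfer {grid n memo memo'} :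
    ∀ (s ab ab' : List (Nat × Nat × Bool)), pvWF grid n s ab memo →
      pvTrans n ab ab' memo memo' → pvWF grid n s ab' memo' := by
  intro s
  induction s with
  | nil => intro ab ab' _ _; trivial
  | cons f s ih =>
      intro ab ab' hwf ht
      refine ⟨fun he => ?_, ih _ _ hwf.2 (pvTrans_cons f ht)⟩
      obtain ⟨h1, h2⟩ := hwf.1 he
      exact ⟨fun hc => ht _ _ (h1 hc), fun hc => ht _ _ (h2 hc)⟩

lemma pvContains_insert_mono (d : PySem.Dict Int Int) (k v k' : Int)
    (h : d.contains k' = true) : (d.insert k v).contains k' = true := by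
  rw [PySem.Dict.contains_insert, h, Bool.or_true]

-- top-down characterization of pvD away from the origin
lemma pvD_td (grid : List (List Int)) (i j : Nat) (h : ¬ (i = 0 ∧ j = 0)) :
    pvD grid i j
      = (if 0 < i ∧ pvG grid i j = pvG grid (i-1) j then pvD grid (i-1) j else 0)
      + (if 0 < j ∧ pvG grid i j = pvG grid i (j-1) then pvD grid i (j-1) else 0) := by
  match i, j with
  | 0, 0 => exact absurd ⟨rfl, rfl⟩ h
  | i+1, 0 => simp [pvD]
  | 0, j+1 => simp [pvD]
  | i+1, j+1 => simp [pvD]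

lemma pvM_cons (f : Nat × Nat × Bool) (s : List (Nat × Nat × Bool)) :
    pvM (f :: s) = (if f.2.2 then 1 else 3 ^ (f.1 + f.2.1 + 2)) + pvM s := by
  simp [pvM]

lemma pvM_w_pos (f : Nat × Nat × Bool) :
    1 ≤ (if f.2.2 then 1 else 3 ^ (f.1 + f.2.1 + 2)) := by
  split
  · exact le_refl 1
  · exact Nat.one_le_pow _ _ (by norm_num)

lemma pvWF_cons (grid : List (List Int)) (n : Nat) (f : Nat × Nat × Bool)
    (s ab : List (Nat × Nat × Bool)) (memo : PySem.Dict Int Int) :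
    pvWF grid n (f :: s) ab memo ↔
      ((f.2.2 = true → pvDepsOK grid n f.1 f.2.1 ab memo) ∧ pvWF grid n s (f :: ab) memo) :=
  Iff.rfl

lemma pvM_cons_false (i j : Nat) (s : List (Nat × Nat × Bool)) :
    pvM ((i, j, false) :: s) = 3 ^ (i + j + 2) + pvM s := by simp [pvM]

lemma pvM_cons_true (i j : Nat) (s : List (Nat × Nat × Bool)) :
    pvM ((i, j, true) :: s) = 1 + pvM s := by simp [pvM]

-- main loop invariant: the memo stays correct and every covered cell ends up memoized
lemma pvLoop_main (grid : List (List Int)) (n : Nat) (hn : 0 < n) :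
    ∀ (fuel : Nat) (stack : List (Nat × Nat × Bool)) (memo : PySem.Dict Int Int),
      pvGood grid n memo → (∀ f ∈ stack, f.2.1 < n) → pvWF grid n stack [] memo →
      pvM stack ≤ fuel →
      pvGood grid n (pvLoop grid n fuel stack memo) ∧
      (∀ a b : Nat, pvCov n stack memo a b →
        (pvLoop grid n fuel stack memo).contains (pvKeyN n a b) = true) := by
  intro fuel
  induction fuel with
  | zero =>
      intro stack memo hgood hinr _ hM
      match stack with
      | [] =>
          refine ⟨hgood, fun a b hc => ?_⟩
          rcases hc with hm | ⟨f, hf, _⟩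
          · simpa [pvLoop] using hm
          · simp at hf
      | f :: s =>
          exfalso
          have := pvM_w_pos f
          rw [pvM_cons] at hM
          omega
  | succ fuel ih =>
      intro stack memo hgood hinr hwf hM
      match stack with
      | [] =>
          refine ⟨hgood, fun a b hc => ?_⟩
          rcases hc with hm | ⟨f, hf, _⟩
          · simpa [pvLoop] using hm
          · simp at hf
      | (i, j, e) :: rest =>
          have hjn : j < n := hinr (i, j, e) List.mem_cons_self
          have hinr' : ∀ f ∈ rest, f.2.1 < n := fun f hf => hinr f (List.mem_cons_of_mem _ hf)
          have hMrest : pvM rest ≤ fuel := by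
            have := pvM_w_pos (i, j, e)
            rw [pvM_cons] at hM
            omega
          by_cases hcont : memo.contains ((i * n + j : Nat) : Int) = true
          -- 1: the cell is already memoized; pop
          · rw [show pvLoop grid n (fuel+1) ((i, j, e) :: rest) memo
                = pvLoop grid n fuel rest memo from by rw [pvLoop]; rw [if_pos hcont]]
            have htr : pvTrans n [(i, j, e)] [] memo memo := by
              intro a b hc
              rcases hc with hm | ⟨f, hf, hk⟩
              · exact Or.inl hm
              · have hfe := List.mem_singleton.mp hf
                have ha : a = i := by rw [← hk.1, hfe]
                have hb : b = j := by rw [← hk.2, hfe]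
                subst ha; subst hb
                exact Or.inl hcont
            have hwf' : pvWF grid n rest [] memo := pvWF_transfer rest _ _ hwf.2 htr
            obtain ⟨hg2, hc2⟩ := ih rest memo hgood hinr' hwf' hMrest
            refine ⟨hg2, fun a b hc => hc2 a b ?_⟩
            rcases hc with hm | ⟨f, hf, hk⟩
            · exact Or.inl hm
            · rcases List.mem_cons.mp hf with hfe | hf'
              · have ha : a = i := by rw [← hk.1, hfe]
                have hb : b = j := by rw [← hk.2, hfe]
                subst ha; subst hb
                exact Or.inl hcont
              · exact Or.inr ⟨f, hf', hk⟩
          · by_cases hk0 : i * n + j = 0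
            -- 2: the origin; memoize 1
            · have hi0 : i = 0 := by
                rcases Nat.eq_zero_of_add_eq_zero_right hk0 with h'
                rcases Nat.mul_eq_zero.mp h' with h'' | h''
                · exact h''
                · omega
              have hj0 : j = 0 := Nat.eq_zero_of_add_eq_zero_left hk0
              subst hi0; subst hj0
              rw [show pvLoop grid n (fuel+1) ((0, 0, e) :: rest) memo
                  = pvLoop grid n fuel rest (memo.insert 0 1) from by
                rw [pvLoop]; rw [if_neg hcont, if_pos (by simp)]]
              have hkey0 : pvKeyN n 0 0 = 0 := by simp [pvKeyN]
              have hgood' : pvGood grid n (memo.insert 0 1) := by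
                intro a b hb v hv
                rw [PySem.Dict.get?_insert] at hv
                split_ifs at hv with heq
                · obtain ⟨rfl, rfl⟩ := pvKeyN_inj hb hn (by rw [heq, hkey0])
                  simp only [Option.some_inj] at hv
                  rw [← hv]
                  simp [pvD]
                · exact hgood a b hb v hv
              have hcontx : (memo.insert 0 1).contains (pvKeyN n 0 0) = true := by
                rw [hkey0]
                exact PySem.Dict.contains_insert_self _ _ _
              have htr : pvTrans n [(0, 0, e)] [] memo (memo.insert 0 1) := by
                intro a b hc
                rcases hc with hm | ⟨f, hf, hk⟩
                · exact Or.inl (pvContains_insert_mono _ _ _ _ hm)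
                · have hfe := List.mem_singleton.mp hf
                  have ha : a = 0 := by rw [← hk.1, hfe]
                  have hb : b = 0 := by rw [← hk.2, hfe]
                  subst ha; subst hb
                  exact Or.inl hcontx
              have hwf' : pvWF grid n rest [] (memo.insert 0 1) :=
                pvWF_transfer rest _ _ hwf.2 htr
              obtain ⟨hg2, hc2⟩ := ih rest (memo.insert 0 1) hgood' hinr' hwf' hMrest
              refine ⟨hg2, fun a b hc => hc2 a b ?_⟩
              rcases hc with hm | ⟨f, hf, hk⟩
              · exact Or.inl (pvContains_insert_mono _ _ _ _ hm)
              · rcases List.mem_cons.mp hf with hfe | hf'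
                · have ha : a = 0 := by rw [← hk.1, hfe]
                  have hb : b = 0 := by rw [← hk.2, hfe]
                  subst ha; subst hb
                  exact Or.inl hcontx
                · exact Or.inr ⟨f, hf', hk⟩
            · have hne00 : ¬ (i = 0 ∧ j = 0) := by
                rintro ⟨rfl, rfl⟩
                simp at hk0
              match e with
              -- 3: expanded frame: both deps are memoized; memoize this cell
              | true =>
                  obtain ⟨hd1, hd2⟩ := hwf.1 rfl
                  have hgetU : (0 < i ∧ pvG grid i j = pvG grid (i-1) j) →
                      memo.getD ((i * n + j - n : Nat) : Int) 0 = pvD grid (i-1) j := by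
                    intro hc
                    have hkeyU : ((i * n + j - n : Nat) : Int) = pvKeyN n (i-1) j := by
                      have h1 : (i - 1) * n = i * n - n := Nat.sub_one_mul i n
                      have h2 : n ≤ i * n := Nat.le_mul_of_pos_left n hc.1
                      simp only [pvKeyN]
                      congr 1
                      omega
                    rcases hd1 hc with hm | ⟨f, hf, _⟩
                    · have hsome : (memo.get? (pvKeyN n (i-1) j)).isSome := by
                        rw [← PySem.Dict.contains_eq_isSome_get?]
                        exact hm
                      obtain ⟨v, hv⟩ := Option.isSome_iff_exists.mp hsome
                      rw [hkeyU, PySem.Dict.getD_of_get?_eq_some _ 0 hv]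
                      exact hgood (i-1) j hjn v hv
                    · simp at hf
                  have hgetL : (0 < j ∧ pvG grid i j = pvG grid i (j-1)) →
                      memo.getD ((i * n + j - 1 : Nat) : Int) 0 = pvD grid i (j-1) := by
                    intro hc
                    have hkeyL : ((i * n + j - 1 : Nat) : Int) = pvKeyN n i (j-1) := by
                      simp only [pvKeyN]
                      congr 1
                      omega
                    rcases hd2 hc with hm | ⟨f, hf, _⟩
                    · have hsome : (memo.get? (pvKeyN n i (j-1))).isSome := by
                        rw [← PySem.Dict.contains_eq_isSome_get?]
                        exact hm
                      obtain ⟨v, hv⟩ := Option.isSome_iff_exists.mp hsome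
                      rw [hkeyL, PySem.Dict.getD_of_get?_eq_some _ 0 hv]
                      exact hgood i (j-1) (by omega) v hv
                    · simp at hf
                  have htotal :
                      ((if 0 < i ∧ pvG grid i j = pvG grid (i-1) j
                          then memo.getD ((i * n + j - n : Nat) : Int) 0 else 0)
                       + (if 0 < j ∧ pvG grid i j = pvG grid i (j-1)
                          then memo.getD ((i * n + j - 1 : Nat) : Int) 0 else 0))
                        = pvD grid i j := by
                    rw [pvD_td grid i j hne00]
                    congr 1
                    · split_ifs with hc
                      · exact hgetU hc
                      · rfl
                    · split_ifs with hc
                      · exact hgetL hc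
                      · rfl
                  rw [show pvLoop grid n (fuel+1) ((i, j, true) :: rest) memo
                      = pvLoop grid n fuel rest (memo.insert ((i * n + j : Nat) : Int)
                          ((if 0 < i ∧ pvG grid i j = pvG grid (i-1) j
                              then memo.getD ((i * n + j - n : Nat) : Int) 0 else 0)
                           + (if 0 < j ∧ pvG grid i j = pvG grid i (j-1)
                              then memo.getD ((i * n + j - 1 : Nat) : Int) 0 else 0))) from by
                    rw [pvLoop]; rw [if_neg hcont, if_neg hk0, if_pos rfl]]
                  set memo' := memo.insert ((i * n + j : Nat) : Int)
                      ((if 0 < i ∧ pvG grid i j = pvG grid (i-1) j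
                          then memo.getD ((i * n + j - n : Nat) : Int) 0 else 0)
                       + (if 0 < j ∧ pvG grid i j = pvG grid i (j-1)
                          then memo.getD ((i * n + j - 1 : Nat) : Int) 0 else 0)) with hmemo'
                  have hgood' : pvGood grid n memo' := by
                    intro a b hb v hv
                    rw [hmemo', PySem.Dict.get?_insert] at hv
                    by_cases heq : pvKeyN n a b = ((i * n + j : Nat) : Int)
                    · rw [if_pos heq] at hv
                      obtain ⟨rfl, rfl⟩ :=
                        pvKeyN_inj hb hjn (show pvKeyN n a b = pvKeyN n i j from heq)
                      rw [← Option.some_inj.mp hv]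
                      exact htotal
                    · rw [if_neg heq] at hv
                      exact hgood a b hb v hv
                  have hcontx : memo'.contains (pvKeyN n i j) = true := by
                    rw [hmemo']
                    exact PySem.Dict.contains_insert_self _ _ _
                  have htr : pvTrans n [(i, j, true)] [] memo memo' := by
                    intro a b hc
                    rcases hc with hm | ⟨f, hf, hk⟩
                    · exact Or.inl (by rw [hmemo']; exact pvContains_insert_mono _ _ _ _ hm)
                    · have hfe := List.mem_singleton.mp hf
                      have ha : a = i := by rw [← hk.1, hfe]
                      have hb : b = j := by rw [← hk.2, hfe]
                      subst ha; subst hb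
                      exact Or.inl hcontx
                  have hwf' : pvWF grid n rest [] memo' := pvWF_transfer rest _ _ hwf.2 htr
                  obtain ⟨hg2, hc2⟩ := ih rest memo' hgood' hinr' hwf' hMrest
                  refine ⟨hg2, fun a b hc => hc2 a b ?_⟩
                  rcases hc with hm | ⟨f, hf, hk⟩
                  · exact Or.inl (by rw [hmemo']; exact pvContains_insert_mono _ _ _ _ hm)
                  · rcases List.mem_cons.mp hf with hfe | hf'
                    · have ha : a = i := by rw [← hk.1, hfe]
                      have hb : b = j := by rw [← hk.2, hfe]
                      subst ha; subst hb
                      exact Or.inl hcontx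
                    · exact Or.inr ⟨f, hf', hk⟩
              -- 4: unexpanded frame: push the expanded frame and its pending deps
              | false =>
                  rw [show pvLoop grid n (fuel+1) ((i, j, false) :: rest) memo
                      = pvLoop grid n fuel
                          ((if 0 < j ∧ pvG grid i j = pvG grid i (j-1)
                              then [((i, j-1, false) : Nat × Nat × Bool)] else []) ++
                           (if 0 < i ∧ pvG grid i j = pvG grid (i-1) j
                              then [((i-1, j, false) : Nat × Nat × Bool)] else []) ++
                           ((i, j, true) :: rest)) memo from by
                    rw [pvLoop]; rw [if_neg hcont, if_neg hk0, if_neg (by simp)]]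
                  set stk' := ((if 0 < j ∧ pvG grid i j = pvG grid i (j-1)
                      then [((i, j-1, false) : Nat × Nat × Bool)] else []) ++
                    (if 0 < i ∧ pvG grid i j = pvG grid (i-1) j
                      then [((i-1, j, false) : Nat × Nat × Bool)] else []) ++
                    ((i, j, true) :: rest)) with hstk'
                  have hinr2 : ∀ f ∈ stk', f.2.1 < n := by
                    intro f hf
                    rw [hstk'] at hf
                    simp only [List.mem_append, List.mem_cons] at hf
                    rcases hf with (hf | hf) | hf | hf
                    · split_ifs at hf with hc
                      · simp only [List.mem_singleton] at hf
                        subst hf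
                        show j - 1 < n
                        omega
                      · simp at hf
                    · split_ifs at hf with hc
                      · simp only [List.mem_singleton] at hf
                        subst hf
                        exact hjn
                      · simp at hf
                    · subst hf
                      exact hjn
                    · exact hinr' f hf
                  have hwf2 : pvWF grid n stk' [] memo := by
                    have hrest : ∀ ab', ((i, j, true) ∈ ab') →
                        pvWF grid n rest ab' memo := by
                      intro ab' hmem
                      refine pvWF_transfer rest _ _ hwf.2 ?_
                      intro a b hc
                      rcases hc with hm | ⟨f, hf, hk⟩
                      · exact Or.inl hm
                      · have hfe := List.mem_singleton.mp hf
                        refine Or.inr ⟨(i, j, true), hmem, ?_, ?_⟩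
                        · rw [← hk.1, hfe]
                        · rw [← hk.2, hfe]
                    rw [hstk']
                    by_cases hcL : 0 < j ∧ pvG grid i j = pvG grid i (j-1) <;>
                      by_cases hcU : 0 < i ∧ pvG grid i j = pvG grid (i-1) j
                    · rw [if_pos hcL, if_pos hcU]
                      simp only [List.append_assoc, List.singleton_append, List.cons_append,
                        List.nil_append]
                      rw [pvWF_cons, pvWF_cons, pvWF_cons]
                      refine ⟨fun h => by simp at h, fun h => by simp at h, fun _ => ?_,
                        hrest _ (by simp)⟩
                      exact ⟨fun _ => Or.inr ⟨(i-1, j, false), by simp, rfl, rfl⟩,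
                        fun _ => Or.inr ⟨(i, j-1, false), by simp, rfl, rfl⟩⟩
                    · rw [if_pos hcL, if_neg hcU]
                      simp only [List.append_assoc, List.singleton_append, List.cons_append,
                        List.nil_append]
                      rw [pvWF_cons, pvWF_cons]
                      refine ⟨fun h => by simp at h, fun _ => ?_, hrest _ (by simp)⟩
                      exact ⟨fun hc => absurd hc hcU,
                        fun _ => Or.inr ⟨(i, j-1, false), by simp, rfl, rfl⟩⟩
                    · rw [if_neg hcL, if_pos hcU]
                      simp only [List.append_assoc, List.singleton_append, List.cons_append,
                        List.nil_append]
                      rw [pvWF_cons, pvWF_cons]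
                      refine ⟨fun h => by simp at h, fun _ => ?_, hrest _ (by simp)⟩
                      exact ⟨fun _ => Or.inr ⟨(i-1, j, false), by simp, rfl, rfl⟩,
                        fun hc => absurd hc hcL⟩
                    · rw [if_neg hcL, if_neg hcU]
                      simp only [List.append_assoc, List.singleton_append, List.cons_append,
                        List.nil_append]
                      rw [pvWF_cons]
                      refine ⟨fun _ => ?_, hrest _ (by simp)⟩
                      exact ⟨fun hc => absurd hc hcU, fun hc => absurd hc hcL⟩
                  have hM2 : pvM stk' ≤ fuel := by
                    have h3 : (3:Nat) ^ (i + j + 2) = 3 * 3 ^ (i + j + 1) := by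
                      rw [pow_succ]
                      ring
                    have h1 : 1 ≤ (3:Nat) ^ (i + j + 1) := Nat.one_le_pow _ _ (by norm_num)
                    rw [pvM_cons_false] at hM
                    rw [hstk']
                    by_cases hcL : 0 < j ∧ pvG grid i j = pvG grid i (j-1) <;>
                      by_cases hcU : 0 < i ∧ pvG grid i j = pvG grid (i-1) j
                    · rw [if_pos hcL, if_pos hcU]
                      simp only [List.append_assoc, List.singleton_append, List.cons_append,
                        List.nil_append]
                      rw [pvM_cons_false, pvM_cons_false, pvM_cons_true]
                      have e1 : i + (j-1) + 2 = i + j + 1 := by omega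
                      have e2 : (i-1) + j + 2 = i + j + 1 := by omega
                      rw [e1, e2]
                      omega
                    · rw [if_pos hcL, if_neg hcU]
                      simp only [List.append_assoc, List.singleton_append, List.cons_append,
                        List.nil_append]
                      rw [pvM_cons_false, pvM_cons_true]
                      have e1 : i + (j-1) + 2 = i + j + 1 := by omega
                      rw [e1]
                      omega
                    · rw [if_neg hcL, if_pos hcU]
                      simp only [List.append_assoc, List.singleton_append, List.cons_append,
                        List.nil_append]
                      rw [pvM_cons_false, pvM_cons_true]
                      have e2 : (i-1) + j + 2 = i + j + 1 := by omega
                      rw [e2]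
                      omega
                    · rw [if_neg hcL, if_neg hcU]
                      simp only [List.append_assoc, List.singleton_append, List.cons_append,
                        List.nil_append]
                      rw [pvM_cons_true]
                      omega
                  obtain ⟨hg2, hc2⟩ := ih stk' memo hgood hinr2 hwf2 hM2
                  refine ⟨hg2, fun a b hc => hc2 a b ?_⟩
                  rcases hc with hm | ⟨f, hf, hk⟩
                  · exact Or.inl hm
                  · rcases List.mem_cons.mp hf with hfe | hf'
                    · refine Or.inr ⟨(i, j, true), by rw [hstk']; simp, ?_, ?_⟩
                      · rw [← hk.1, hfe]
                      · rw [← hk.2, hfe]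
                    · refine Or.inr ⟨f, ?_, hk⟩
                      rw [hstk']
                      simp [hf']

lemma b_eq_pvD (grid : List (List Int)) (h : Pre_count_min_cost_paths grid) :
    count_min_cost_paths_alt grid = pvD grid (grid.length - 1) ((grid.getD 0 []).length - 1) := by
  obtain ⟨hg, hrow0, _⟩ := h
  have hm1 : 1 ≤ grid.length := List.length_pos_iff.mpr hg
  have hn1 : 1 ≤ (grid.getD 0 []).length := List.length_pos_iff.mpr hrow0
  unfold count_min_cost_paths_alt
  simp only []
  set m := grid.length with hm
  set n := (grid.getD 0 []).length with hn
  have hgood0 : pvGood grid n PySem.Dict.empty := by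
    intro a b _ v hv
    simp [PySem.Dict.get?_empty] at hv
  have hinr0 : ∀ f ∈ [((m-1, n-1, false) : Nat × Nat × Bool)], f.2.1 < n := by
    intro f hf
    simp only [List.mem_singleton] at hf
    subst hf
    show n - 1 < n
    omega
  have hwf0 : pvWF grid n [(m-1, n-1, false)] [] PySem.Dict.empty :=
    ⟨by simp, trivial⟩
  have hM0 : pvM [((m-1, n-1, false) : Nat × Nat × Bool)] ≤ 3 ^ (m + n) := by
    have he : (m-1) + (n-1) + 2 = m + n := by omega
    simp [pvM, he]
  obtain ⟨hgood, hcov⟩ := pvLoop_main grid n (by omega) (3 ^ (m + n))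
    [(m-1, n-1, false)] PySem.Dict.empty hgood0 hinr0 hwf0 hM0
  have hcontx := hcov (m-1) (n-1)
    (Or.inr ⟨(m-1, n-1, false), List.mem_singleton.mpr rfl, rfl, rfl⟩)
  have hsome : ((pvLoop grid n (3 ^ (m + n)) [(m-1, n-1, false)]
      PySem.Dict.empty).get? (pvKeyN n (m-1) (n-1))).isSome := by
    rw [← PySem.Dict.contains_eq_isSome_get?]
    exact hcontx
  obtain ⟨v, hv⟩ := Option.isSome_iff_exists.mp hsome
  have hval := hgood (m-1) (n-1) (by omega) v hv
  have hkey : ((m * n - 1 : Nat) : Int) = pvKeyN n (m-1) (n-1) := by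
    have h1 : (m - 1) * n = m * n - n := Nat.sub_one_mul m n
    have h2 : n ≤ m * n := Nat.le_mul_of_pos_left n (by omega)
    simp only [pvKeyN]
    congr 1
    omega
  rw [hkey, PySem.Dict.getD_of_get?_eq_some _ 0 hv, hval]

-- ===== VERDICT (by name: the statement is the Claim_ definition above) =====
theorem count_min_cost_paths_spec : Claim_equal_count_min_cost_paths := by
  intro grid _ hpre
  unfold Spec_count_min_cost_paths
  rw [a_eq_pvD grid hpre, b_eq_pvD grid hpre]
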